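-- pv_equiv track=rewrite | github.com/ttyoma/Trivia.NET | server.py | generate_leaderboard_state
-- ===== SOURCE A (Python) =====
-- from typing import Any
--
-- def generate_leaderboard_state(scores: dict[tuple[str,int], int], usernames, config: dict[str, Any]) -> str:
--
--     rows = [(addr, usernames.get(addr, "?"), score) for addr, score in scores.items()]
--     rows.sort(key=lambda r: (-r[2], r[1], r[0]))
--
--     lines = []
--     rank = 1
--     prev_score = None
--     players_seen = 0
--
--     for _, uname, points in rows:
--         players_seen += 1
--         if prev_score is not None and points < prev_score:
--             rank = players_seen
--         prev_score = points
--
--         if points == 1: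
--             noun = config["points_noun_singular"]
--         else:
--             noun = config["points_noun_plural"]
--
--         lines.append(f"{rank}. {uname}: {points} {noun}")
--
--     return "\n".join(lines)
-- ===== SOURCE B (Python) =====
-- from itertools import groupby
--
--
-- def generate_leaderboard_state(scores, usernames, config):
--     rows = sorted(((addr, usernames.get(addr, "?"), score)
--                    for addr, score in scores.items()),
--                   key=lambda r: (-r[2], r[1], r[0]))
--     lines = []
--     offset = 0
--     for points, group in groupby(rows, key=lambda r: r[2]):
--         members = list(group)
--         rank = offset + 1
--         noun = config["points_noun_singular"] if points == 1 else config["points_noun_plural"]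
--         lines.extend(f"{rank}. {uname}: {points} {noun}" for _, uname, points in members)
--         offset += len(members)
--     return "\n".join(lines)
-- ===== Notes on version B (the rewrite author's own statement) =====
-- stated objective: idiomatic
-- what changed: Replaces A's stateful per-row loop (rank/prev_score/players_seen bookkeeping) with an itertools.groupby pass over the sorted rows keyed on the score: each score group gets rank = running offset + 1 and the noun is computed once per group.
import Mathlib
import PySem

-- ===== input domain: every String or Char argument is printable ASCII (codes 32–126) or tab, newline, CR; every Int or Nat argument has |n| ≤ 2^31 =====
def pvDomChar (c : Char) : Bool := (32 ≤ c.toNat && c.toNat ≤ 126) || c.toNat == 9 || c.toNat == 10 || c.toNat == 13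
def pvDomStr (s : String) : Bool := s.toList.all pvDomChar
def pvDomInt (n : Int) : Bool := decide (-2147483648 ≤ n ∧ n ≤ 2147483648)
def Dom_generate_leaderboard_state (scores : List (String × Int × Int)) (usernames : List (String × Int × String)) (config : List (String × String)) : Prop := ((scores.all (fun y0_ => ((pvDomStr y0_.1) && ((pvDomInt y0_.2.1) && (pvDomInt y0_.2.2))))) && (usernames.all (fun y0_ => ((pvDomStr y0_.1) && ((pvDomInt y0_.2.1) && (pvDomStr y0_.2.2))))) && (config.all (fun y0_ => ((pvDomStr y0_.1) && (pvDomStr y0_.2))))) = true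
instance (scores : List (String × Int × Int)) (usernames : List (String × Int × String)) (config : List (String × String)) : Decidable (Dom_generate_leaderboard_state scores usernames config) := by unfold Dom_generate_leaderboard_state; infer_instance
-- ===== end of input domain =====

-- B replaces A's stateful rank/prev_score loop by a grouped pass (groupby over the sorted
-- rows keyed on the score, rank = running offset + 1 per group); objective: idiomatic.

-- shared helpers: both Pythons build the same rows, the same sort key and the same line text
-- a row is (addr, uname, score) with addr : String × Int
def pvUserGet (usernames : List (String × Int × String)) (a : String × Int) : String :=
  (((usernames.find? (fun u => u.1 == a.1 && u.2.1 == a.2)).map (fun u => u.2.2)).getD "?")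

def pvCfg (config : List (String × String)) (k : String) : String :=
  (((config.find? (fun p => p.1 == k)).map (fun p => p.2)).getD "")   -- KeyError excluded by Pre_

def pvKey (r : (String × Int) × String × Int) : Lex (Int × Lex (String × Lex (String × Int))) :=
  toLex (-r.2.2, toLex (r.2.1, toLex r.1))

def pvLine (rank : Int) (uname : String) (points : Int) (noun : String) : String :=
  PySem.Int.toStr rank ++ ". " ++ uname ++ ": " ++ PySem.Int.toStr points ++ " " ++ noun

def pvRows (scores : List (String × Int × Int)) (usernames : List (String × Int × String)) :
    List ((String × Int) × String × Int) :=
  PySem.List.sorted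
    (scores.map (fun s => ((s.1, s.2.1), pvUserGet usernames (s.1, s.2.1), s.2.2)))
    pvKey

-- ===== PORT A =====
-- A's loop state: (lines, rank, prev_score, players_seen)
def pvStepA (config : List (String × String))
    (st : List String × Int × Option Int × Int) (r : (String × Int) × String × Int) :
    List String × Int × Option Int × Int :=
  let seen := st.2.2.2 + 1
  let rank := match st.2.2.1 with
    | some p => if r.2.2 < p then seen else st.2.1
    | none => st.2.1
  let noun := if r.2.2 = 1 then pvCfg config "points_noun_singular"
              else pvCfg config "points_noun_plural"
  (st.1 ++ [pvLine rank r.2.1 r.2.2 noun], rank, some r.2.2, seen)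

def generate_leaderboard_state (scores : List (String × Int × Int)) (usernames : List (String × Int × String)) (config : List (String × String)) : String :=
  String.intercalate "\n"
    ((pvRows scores usernames).foldl (pvStepA config) ([], 1, none, 0)).1

-- ===== PORT B =====
-- itertools.groupby over the sorted rows, keyed on the score
def pvGroupBy : List ((String × Int) × String × Int) → List (Int × List ((String × Int) × String × Int))
  | [] => []
  | r :: rs =>
      (r.2.2, r :: rs.takeWhile (fun x => x.2.2 == r.2.2)) ::
        pvGroupBy (rs.dropWhile (fun x => x.2.2 == r.2.2))
termination_by l => l.length
decreasing_by
  simp only [List.length_cons]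
  exact Nat.lt_succ_of_le (List.length_dropWhile_le _ _)

-- B's loop state: (lines, offset)
def pvStepB (config : List (String × String))
    (st : List String × Int) (g : Int × List ((String × Int) × String × Int)) :
    List String × Int :=
  let rank := st.2 + 1
  let noun := if g.1 = 1 then pvCfg config "points_noun_singular"
              else pvCfg config "points_noun_plural"
  (st.1 ++ g.2.map (fun r => pvLine rank r.2.1 r.2.2 noun), st.2 + (g.2.length : Int))

def generate_leaderboard_state_alt (scores : List (String × Int × Int)) (usernames : List (String × Int × String)) (config : List (String × String)) : String :=
  String.intercalate "\n"
    ((pvGroupBy (pvRows scores usernames)).foldl (pvStepB config) ([], 0)).1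

-- ===== PRECONDITION & SPEC =====
-- Pre_ excludes exactly the inputs where A raises KeyError: a noun key looked up for some
-- row (singular for points == 1, plural otherwise) that is missing from config.
def Pre_generate_leaderboard_state (scores : List (String × Int × Int)) (usernames : List (String × Int × String)) (config : List (String × String)) : Prop :=
  (scores.any (fun s => s.2.2 == 1) = true → config.any (fun p => p.1 == "points_noun_singular") = true) ∧
  (scores.any (fun s => s.2.2 != 1) = true → config.any (fun p => p.1 == "points_noun_plural") = true)
instance (scores : List (String × Int × Int)) (usernames : List (String × Int × String)) (config : List (String × String)) : Decidable (Pre_generate_leaderboard_state scores usernames config) := by unfold Pre_generate_leaderboard_state; infer_instance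

def pvWitness_generate_leaderboard_state : (List (String × Int × Int)) × (List (String × Int × String)) × (List (String × String)) :=
  ([("a", 0, 1), ("b", 1, 3)], [("a", 0, "alice")],
   [("points_noun_singular", "point"), ("points_noun_plural", "points")])

def Spec_generate_leaderboard_state (scores : List (String × Int × Int)) (usernames : List (String × Int × String)) (config : List (String × String)) (out : String) : Prop := out = generate_leaderboard_state_alt scores usernames config
instance (scores : List (String × Int × Int)) (usernames : List (String × Int × String)) (config : List (String × String)) (out : String) : Decidable (Spec_generate_leaderboard_state scores usernames config out) := by unfold Spec_generate_leaderboard_state; infer_instance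

-- ===== CLAIM (what is proved, stated in full; the proofs are below) =====
def Claim_equal_generate_leaderboard_state : Prop := ∀ (scores : List (String × Int × Int)) (usernames : List (String × Int × String)) (config : List (String × String)), Dom_generate_leaderboard_state scores usernames config → Pre_generate_leaderboard_state scores usernames config → Spec_generate_leaderboard_state scores usernames config (generate_leaderboard_state scores usernames config)

-- ===== LEMMAS AND PROOFS =====

lemma pv_dropWhile_head_false {α : Type} (p : α → Bool) :
    ∀ (l : List α) (x : α) (xs : List α), l.dropWhile p = x :: xs → p x = false := by
  intro l
  induction l with
  | nil => intro x xs h; simp [List.dropWhile] at h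
  | cons a t ih =>
      intro x xs h
      by_cases hp : p a = true
      · rw [List.dropWhile_cons_of_pos hp] at h; exact ih x xs h
      · rw [List.dropWhile_cons_of_neg hp] at h
        cases h; simpa using hp

-- processing one run of rows whose score all equals v, with prev_score = some v
lemma pv_runA (config : List (String × String)) (v : Int) :
    ∀ (g : List ((String × Int) × String × Int)), (∀ r ∈ g, r.2.2 = v) →
    ∀ (lines : List String) (rank seen : Int),
    g.foldl (pvStepA config) (lines, rank, some v, seen) =
      (lines ++ g.map (fun r => pvLine rank r.2.1 r.2.2
        (if v = 1 then pvCfg config "points_noun_singular" else pvCfg config "points_noun_plural")),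
       rank, some v, seen + (g.length : Int)) := by
  intro g
  induction g with
  | nil => intro _ lines rank seen; simp
  | cons x t ih =>
      intro hv lines rank seen
      have hx : x.2.2 = v := hv x (by simp)
      have ht : ∀ r ∈ t, r.2.2 = v := fun r hr => hv r (by simp [hr])
      simp only [List.foldl_cons]
      have hstep : pvStepA config (lines, rank, some v, seen) x =
          (lines ++ [pvLine rank x.2.1 x.2.2
            (if v = 1 then pvCfg config "points_noun_singular" else pvCfg config "points_noun_plural")],
           rank, some v, seen + 1) := by
        simp [pvStepA, hx]
      rw [hstep, ih ht]
      have harith : seen + 1 + (t.length : Int) = seen + ((t.length : Int) + 1) := by ring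
      simp [List.append_assoc, harith]

-- the main correspondence: A's stateful fold vs B's grouped fold, on score-nonincreasing rows
lemma pv_main (config : List (String × String)) :
    ∀ (n : Nat) (rows : List ((String × Int) × String × Int)), rows.length ≤ n →
    rows.Pairwise (fun a b => b.2.2 ≤ a.2.2) →
    ∀ (lines : List String) (seen rank : Int) (prev : Option Int),
    ((prev = none ∧ seen = 0 ∧ rank = 1) ∨ (∃ p, prev = some p ∧ ∀ r ∈ rows, r.2.2 < p)) →
    (rows.foldl (pvStepA config) (lines, rank, prev, seen)).1 =
      ((pvGroupBy rows).foldl (pvStepB config) (lines, seen)).1 := by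
  intro n
  induction n with
  | zero =>
      intro rows hlen _ lines seen rank prev _
      have : rows = [] := List.eq_nil_of_length_eq_zero (Nat.le_zero.mp hlen)
      subst this; simp [pvGroupBy]
  | succ m ih =>
      intro rows hlen hpw lines seen rank prev hH
      cases rows with
      | nil => simp [pvGroupBy]
      | cons r rest =>
          set v := r.2.2 with hv
          set g := rest.takeWhile (fun x => x.2.2 == v) with hg
          set rest' := rest.dropWhile (fun x => x.2.2 == v) with hrest'
          -- first step of A
          have hstep : pvStepA config (lines, rank, prev, seen) r =
              (lines ++ [pvLine (seen + 1) r.2.1 r.2.2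
                (if v = 1 then pvCfg config "points_noun_singular" else pvCfg config "points_noun_plural")],
               seen + 1, some v, seen + 1) := by
            rcases hH with ⟨hp, hs, hr⟩ | ⟨p, hp, hlt⟩
            · subst hp; subst hs; subst hr; simp [pvStepA, hv]
            · subst hp
              have : r.2.2 < p := hlt r (by simp)
              simp [pvStepA, this, hv]
          -- facts about g and rest'
          have hgv : ∀ x ∈ g, x.2.2 = v := by
            intro x hx
            have := List.mem_takeWhile_imp hx
            simpa using this
          have hrestle : ∀ x ∈ rest, x.2.2 ≤ v := by
            intro x hx
            exact (List.pairwise_cons.mp hpw).1 x hx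
          have hrest'sub : rest'.Sublist rest := List.dropWhile_sublist _
          have hrest'pw : rest'.Pairwise (fun a b => b.2.2 ≤ a.2.2) :=
            ((List.pairwise_cons.mp hpw).2).sublist hrest'sub
          have hrest'lt : ∀ x ∈ rest', x.2.2 < v := by
            cases hre : rest' with
            | nil => intro x hx; simp at hx
            | cons h t =>
                have hhead : (fun x => x.2.2 == v) h = false :=
                  pv_dropWhile_head_false _ rest h t (hrest'.symm.trans hre)
                have hhne : h.2.2 ≠ v := by simpa using hhead
                have hhmem : h ∈ rest' := by rw [hre]; simp
                have hhle : h.2.2 ≤ v := hrestle h (hrest'sub.subset hhmem)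
                have hhlt : h.2.2 < v := lt_of_le_of_ne hhle hhne
                have hpwht : List.Pairwise (fun a b => b.2.2 ≤ a.2.2) (h :: t) :=
                  hre ▸ hrest'pw
                intro x hx
                rcases List.mem_cons.mp hx with hx | hx
                · subst hx; exact hhlt
                · exact lt_of_le_of_lt ((List.pairwise_cons.mp hpwht).1 x hx) hhlt
          -- unfold both sides
          rw [List.foldl_cons, hstep]
          have hsplit : rest = g ++ rest' := (List.takeWhile_append_dropWhile).symm
          rw [hsplit, List.foldl_append,
            pv_runA config v g hgv _ (seen + 1) (seen + 1)]
          have hGB : pvGroupBy (r :: rest) = (v, r :: g) :: pvGroupBy rest' := by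
            rw [pvGroupBy]
          rw [← hsplit, hGB, List.foldl_cons]
          have hstepB : pvStepB config (lines, seen) (v, r :: g) =
              (lines ++ (r :: g).map (fun x => pvLine (seen + 1) x.2.1 x.2.2
                (if v = 1 then pvCfg config "points_noun_singular" else pvCfg config "points_noun_plural")),
               seen + ((g.length : Int) + 1)) := by
            simp [pvStepB]
          rw [hstepB]
          have hlen' : rest'.length ≤ m := by
            have h1 : rest'.length ≤ rest.length := List.length_dropWhile_le _ _
            have h2 : rest.length + 1 ≤ m + 1 := by simpa using hlen
            omega
          have := ih rest' hlen' hrest'pw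
            (lines ++ (r :: g).map (fun x => pvLine (seen + 1) x.2.1 x.2.2
              (if v = 1 then pvCfg config "points_noun_singular" else pvCfg config "points_noun_plural")))
            (seen + ((g.length : Int) + 1)) (seen + 1) (some v)
            (Or.inr ⟨v, rfl, hrest'lt⟩)
          have harith : seen + ((g.length : Int) + 1) = seen + 1 + (g.length : Int) := by ring
          rw [harith] at this ⊢
          simp only [List.map_cons, List.append_assoc, List.singleton_append] at this ⊢
          exact this

lemma pv_rows_pairwise (scores : List (String × Int × Int)) (usernames : List (String × Int × String)) :
    (pvRows scores usernames).Pairwise (fun a b => b.2.2 ≤ a.2.2) := by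
  have h := PySem.List.sorted_pairwise
    (scores.map (fun s => ((s.1, s.2.1), pvUserGet usernames (s.1, s.2.1), s.2.2))) pvKey
  refine h.imp ?_
  intro a b hab
  rcases Prod.Lex.le_iff.mp hab with h1 | ⟨h1, _⟩
  · simp only [pvKey, ofLex_toLex] at h1
    omega
  · simp only [pvKey, ofLex_toLex] at h1
    omega

-- ===== VERDICT (by name: the statement is the Claim_ definition above) =====
theorem generate_leaderboard_state_spec : Claim_equal_generate_leaderboard_state := by
  intro scores usernames config _ _
  unfold Spec_generate_leaderboard_state generate_leaderboard_state generate_leaderboard_state_alt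
  congr 1
  exact pv_main config (pvRows scores usernames).length (pvRows scores usernames) le_rfl
    (pv_rows_pairwise scores usernames) [] 0 1 none (Or.inl ⟨rfl, rfl, rfl⟩)
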